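-- pv_equiv track=rewrite | github.com/caimingA/GA | GArefine.py | drop_loop
-- ===== SOURCE A (Python) =====
-- def drop_loop(path):
--     length = len(path)
--     for j in range(length - 1, -1, -1):
--         for i in range(1, j, 1):
--             if path[i] == path[j]:
--                 newPath = path[:i] + path[j:]
--                 break
--     return newPath
-- ===== SOURCE B (Python) =====
-- def drop_loop(path):
--     # Single pass: remember the first index (>= 1) where each value occurs; at the
--     # first index j whose value was already seen at some i in [1, j), collapse.
--     first = {}
--     for j in range(1, len(path)):
--         v = path[j]
--         if v in first:
--             return path[:first[v]] + path[j:]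
--         first[v] = j
--     raise ValueError("path contains no loop to drop")
-- ===== Notes on version B (the rewrite author's own statement) =====
-- stated objective: faster
-- what changed: Replaces A's nested index scans (for each j, rescan all i in [1,j)) by a single left-to-right pass keeping a hash map of the first index >= 1 at which each value occurs, returning at the first repeated value.
import Mathlib
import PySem

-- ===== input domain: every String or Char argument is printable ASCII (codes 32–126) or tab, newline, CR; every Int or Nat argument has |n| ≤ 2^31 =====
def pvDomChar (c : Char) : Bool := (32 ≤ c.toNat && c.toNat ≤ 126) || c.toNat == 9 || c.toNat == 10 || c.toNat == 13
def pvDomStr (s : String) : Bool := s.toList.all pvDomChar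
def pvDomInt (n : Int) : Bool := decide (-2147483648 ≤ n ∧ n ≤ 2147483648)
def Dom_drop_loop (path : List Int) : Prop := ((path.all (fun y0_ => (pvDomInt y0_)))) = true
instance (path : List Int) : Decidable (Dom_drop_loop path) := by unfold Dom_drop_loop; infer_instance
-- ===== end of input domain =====

-- B replaces A's quadratic double scan by one pass with a first-occurrence map (objective: faster).

-- ===== PORT A =====
-- inner loop 'for i in range(1, j): if path[i] == path[j]: newPath = …; break'
def innerA (path : List Int) (j : Int) : List Int → Option (List Int)
  | [] => none
  | i :: rest =>
    if PySem.List.pyGet? path i = PySem.List.pyGet? path j then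
      some (PySem.List.slice path none (some i) ++ PySem.List.slice path (some j) none)
    else innerA path j rest

def drop_loop (path : List Int) : List Int :=
  let length : Int := (path.length : Int)
  let newPath : Option (List Int) :=
    (PySem.List.pyRange (length - 1) (-1) (-1)).foldl
      (fun acc j =>
        match innerA path j (PySem.List.pyRange 1 j 1) with
        | some r => some r
        | none => acc) none
  newPath.getD []   -- 'none' = Python NameError (newPath never assigned); excluded by Pre_

-- ===== PORT B =====
def altGo (path : List Int) : PySem.Dict Int Int → List Int → List Int
  | _, [] => path   -- Python B raises ValueError here (no loop found); excluded by Pre_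
  | first, j :: rest =>
    let v := PySem.List.pyGetD path j 0   -- j ∈ [1, len) here, so in range
    match first.get? v with
    | some i => PySem.List.slice path none (some i) ++ PySem.List.slice path (some j) none
    | none => altGo path (first.insert v j) rest

def drop_loop_alt (path : List Int) : List Int :=
  altGo path PySem.Dict.empty (PySem.List.pyRange 1 (path.length : Int) 1)

-- ===== PRECONDITION & SPEC =====
-- Pre_ excludes exactly the inputs with no duplicate among indices ≥ 1, on which A raises
-- NameError (newPath is never assigned) and B raises ValueError.
def Pre_drop_loop (path : List Int) : Prop :=
  ∃ j < path.length, ∃ i < j, 1 ≤ i ∧ path[i]? = path[j]?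
instance (path : List Int) : Decidable (Pre_drop_loop path) := by unfold Pre_drop_loop; infer_instance
def pvWitness_drop_loop : List Int := [0, 1, 2, 1]

def Spec_drop_loop (path : List Int) (out : List Int) : Prop := out = drop_loop_alt path
instance (path : List Int) (out : List Int) : Decidable (Spec_drop_loop path out) := by unfold Spec_drop_loop; infer_instance

-- ===== CLAIM (what is proved, stated in full; the proofs are below) =====
def Claim_equal_drop_loop : Prop := ∀ (path : List Int), Dom_drop_loop path → Pre_drop_loop path → Spec_drop_loop path (drop_loop path)

-- ===== LEMMAS AND PROOFS =====

-- A's inner-loop result for index j (proof-side abbreviation)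
def gA (path : List Int) (j : Int) : Option (List Int) :=
  innerA path j (PySem.List.pyRange 1 j 1)

-- first index i ∈ [1, j) with path[i] = v
def firstIdx (path : List Int) (j : Int) (v : Int) : Option Int :=
  (PySem.List.pyRange 1 j 1).find? (fun i => PySem.List.pyGetD path i 0 == v)

def cut (path : List Int) (i j : Int) : List Int :=
  PySem.List.slice path none (some i) ++ PySem.List.slice path (some j) none

-- A's fold over the countdown range picks the LAST successful j, i.e. the first of the reversed list.
theorem foldPick (g : Int → Option (List Int)) (l : List Int) (a : Option (List Int)) :
    l.foldl (fun acc j => match g j with | some r => some r | none => acc) a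
      = match l.reverse.findSome? g with | some r => some r | none => a := by
  induction l generalizing a with
  | nil => simp
  | cons j rest ih =>
    simp only [List.foldl_cons, List.reverse_cons, List.findSome?_append]
    rw [ih]
    cases h : rest.reverse.findSome? g <;> cases hg : g j <;>
      simp [List.findSome?, hg, Option.or]

theorem innerA_char (path : List Int) (j : Int) (hj0 : 0 ≤ j) (hjn : j < (path.length : Int))
    (l : List Int) (hl : ∀ i ∈ l, 0 ≤ i ∧ i < (path.length : Int)) :
    innerA path j l
      = (l.find? (fun i => PySem.List.pyGetD path i 0 == PySem.List.pyGetD path j 0)).map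
          (fun i => cut path i j) := by
  induction l with
  | nil => simp [innerA]
  | cons i rest ih =>
    have hi := hl i (by simp)
    have hrest : ∀ x ∈ rest, 0 ≤ x ∧ x < (path.length : Int) := fun x hx => hl x (by simp [hx])
    simp only [innerA, List.find?_cons]
    rw [PySem.List.pyGet?_eq_some_getElem path hi.1 hi.2,
        PySem.List.pyGet?_eq_some_getElem path hj0 hjn]
    have hgd : ∀ (k : Int) (hk0 : 0 ≤ k) (hkn : k < (path.length : Int)),
        PySem.List.pyGetD path k 0 = path[k.toNat]'(by omega) := by
      intro k hk0 hkn
      rw [PySem.List.pyGetD_of_nonneg path 0 hk0]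
      exact List.getD_eq_getElem path 0 (by omega)
    rw [show (PySem.List.pyGetD path i 0 == PySem.List.pyGetD path j 0)
          = decide (path[i.toNat]'(by omega) = path[j.toNat]'(by omega)) by
        rw [hgd i hi.1 hi.2, hgd j hj0 hjn]; rfl]
    by_cases h : path[i.toNat]'(by omega) = path[j.toNat]'(by omega)
    · simp [h, cut]
    · simp only [h, decide_false, Option.some.injEq]
      exact ih hrest

theorem gA_char (path : List Int) (j : Int) (hj0 : 0 ≤ j) (hjn : j < (path.length : Int)) :
    gA path j = (firstIdx path j (PySem.List.pyGetD path j 0)).map (fun i => cut path i j) := by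
  unfold gA firstIdx
  exact innerA_char path j hj0 hjn _ (fun i hi => by
    rw [PySem.List.mem_pyRange_one] at hi; omega)

theorem firstIdx_succ (path : List Int) (j : Int) (hj : 1 ≤ j) (v : Int) :
    firstIdx path (j + 1) v
      = match firstIdx path j v with
        | some i => some i
        | none => if PySem.List.pyGetD path j 0 == v then some j else none := by
  unfold firstIdx
  rw [PySem.List.pyRange_one_succ_right hj, List.find?_append]
  cases h : (PySem.List.pyRange 1 j).find? (fun i => PySem.List.pyGetD path i 0 == v) <;>
    cases hb : (PySem.List.pyGetD path j 0 == v) <;>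
    simp [List.find?, hb]

theorem altGo_eq (path : List Int) :
    ∀ (m : Nat) (j : Int) (d : PySem.Dict Int Int), 1 ≤ j → j + m = (path.length : Int) →
    (∀ v, d.get? v = firstIdx path j v) →
    altGo path d (PySem.List.pyRange j (path.length : Int) 1)
      = match (PySem.List.pyRange j (path.length : Int) 1).findSome? (gA path) with
        | some r => r | none => path := by
  intro m
  induction m with
  | zero =>
    intro j d hj1 hjm hd
    rw [PySem.List.pyRange_one_eq_nil (by omega)]
    simp [altGo]
  | succ m ih =>
    intro j d hj1 hjm hd
    have hjlt : j < (path.length : Int) := by omega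
    rw [PySem.List.pyRange_one_cons hjlt]
    simp only [altGo, List.findSome?_cons]
    rw [gA_char path j (by omega) hjlt, hd (PySem.List.pyGetD path j 0)]
    cases h : firstIdx path j (PySem.List.pyGetD path j 0) with
    | some i => simp [cut]
    | none =>
      simp only [Option.map_none]
      exact ih (j + 1) _ (by omega) (by omega) (fun w => by
        rw [firstIdx_succ path j hj1 w]
        by_cases hvw : PySem.List.pyGetD path j 0 = w
        · subst hvw
          rw [PySem.Dict.get?_insert_self, h]
          simp
        · rw [PySem.Dict.get?_insert_of_ne _ _ (Ne.symm hvw), hd w]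
          cases hfw : firstIdx path j w <;> simp [beq_iff_eq, hvw])

-- ===== VERDICT (by name: the statement is the Claim_ definition above) =====
theorem drop_loop_spec : Claim_equal_drop_loop := by
  intro path _ hpre
  unfold Spec_drop_loop
  obtain ⟨j, hjlen, i, hij, hi1, heq⟩ := hpre
  have hn3 : 1 ≤ path.length := by omega
  have hA : drop_loop path
      = (match (PySem.List.pyRange 0 (path.length : Int) 1).findSome? (gA path) with
         | some r => r | none => ([] : List Int)) := by
    simp only [drop_loop]
    rw [foldPick]
    rw [PySem.List.pyRange_neg_one_eq_reverse, List.reverse_reverse]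
    have h1 : (-1 : Int) + 1 = 0 := by norm_num
    have h2 : ((path.length : Int) - 1) + 1 = (path.length : Int) := by ring
    rw [h1, h2]
    have hg : (fun j => innerA path j (PySem.List.pyRange 1 j 1)) = gA path := rfl
    rw [hg]
    cases h : (PySem.List.pyRange 0 (path.length : Int) 1).findSome? (gA path) <;> simp
  have hB : drop_loop_alt path
      = (match (PySem.List.pyRange 1 (path.length : Int) 1).findSome? (gA path) with
         | some r => r | none => path) := by
    unfold drop_loop_alt
    exact altGo_eq path (path.length - 1) 1 PySem.Dict.empty (le_refl 1) (by omega)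
      (fun v => by
        unfold firstIdx
        rw [PySem.List.pyRange_one_eq_nil (le_refl 1)]
        simp [PySem.Dict.empty, PySem.Dict.get?])
  have hzero : gA path 0 = none := by
    unfold gA
    rw [PySem.List.pyRange_one_eq_nil (by norm_num)]
    rfl
  have hsplit : PySem.List.pyRange 0 (path.length : Int) 1
      = 0 :: PySem.List.pyRange 1 (path.length : Int) 1 := by
    rw [PySem.List.pyRange_one_cons (by exact_mod_cast hn3)]
    norm_num
  have hs : ((PySem.List.pyRange 1 (path.length : Int) 1).findSome? (gA path)).isSome := by
    rw [List.findSome?_isSome_iff]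
    refine ⟨(j : Int), ?_, ?_⟩
    · rw [PySem.List.mem_pyRange_one]
      constructor <;> [exact_mod_cast (by omega : 1 ≤ j); exact_mod_cast hjlen]
    · rw [gA_char path (j : Int) (by positivity) (by exact_mod_cast hjlen)]
      rw [Option.isSome_map]
      unfold firstIdx
      rw [List.find?_isSome]
      refine ⟨(i : Int), ?_, ?_⟩
      · rw [PySem.List.mem_pyRange_one]
        constructor <;> [exact_mod_cast hi1; exact_mod_cast hij]
      · have hgd : ∀ (k : Nat) (hk : k < path.length),
            PySem.List.pyGetD path (k : Int) 0 = path[k] := by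
          intro k hk
          rw [PySem.List.pyGetD_of_nonneg path 0 (by positivity), Int.toNat_natCast,
            List.getD_eq_getElem path 0 hk]
        have hijlt : i < path.length := by omega
        rw [hgd i hijlt, hgd j hjlen]
        rw [List.getElem?_eq_getElem hijlt, List.getElem?_eq_getElem hjlen] at heq
        simp at heq
        simp [heq]
  obtain ⟨r, hr⟩ := Option.isSome_iff_exists.mp hs
  rw [hA, hB, hsplit, List.findSome?_cons, hzero, hr]
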